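-- pv_equiv track=rewrite | github.com/RidSoftware/University-Work | yr2/Semester1/Programming Languagues (F28PL)/CW2/CW2Q4.py | threatening
-- ===== SOURCE A (Python) =====
-- def threatening(s1, s2):
-- 	# checks Rook moves
-- 	if s1[0] == s2[0] or s1[1] == s2[1]:
-- 		return True
--
--
-- 	# list of knight moves
-- 	knight_m = [(1, 2), (2, 1), (2, -1), (1, -2),(-1, -2), (-2, -1), (-2, 1), (-1, 2)]
--
-- 	# checks Knight moves
-- 	for m in knight_m:
-- 		if (s1[0] + m[0], s1[1] + m[1]) == s2:
-- 			return True
--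
-- 	return False
-- ===== SOURCE B (Python) =====
-- def threatening(s1, s2):
--     dx = abs(s1[0] - s2[0])
--     dy = abs(s1[1] - s2[1])
--     return dx == 0 or dy == 0 or {dx, dy} == {1, 2}
-- ===== Notes on version B (the rewrite author's own statement) =====
-- stated objective: simpler
-- what changed: Replaces the 8-entry knight-move table and the enumerate-and-compare loop with a closed-form arithmetic test on the absolute coordinate deltas.
import Mathlib
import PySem

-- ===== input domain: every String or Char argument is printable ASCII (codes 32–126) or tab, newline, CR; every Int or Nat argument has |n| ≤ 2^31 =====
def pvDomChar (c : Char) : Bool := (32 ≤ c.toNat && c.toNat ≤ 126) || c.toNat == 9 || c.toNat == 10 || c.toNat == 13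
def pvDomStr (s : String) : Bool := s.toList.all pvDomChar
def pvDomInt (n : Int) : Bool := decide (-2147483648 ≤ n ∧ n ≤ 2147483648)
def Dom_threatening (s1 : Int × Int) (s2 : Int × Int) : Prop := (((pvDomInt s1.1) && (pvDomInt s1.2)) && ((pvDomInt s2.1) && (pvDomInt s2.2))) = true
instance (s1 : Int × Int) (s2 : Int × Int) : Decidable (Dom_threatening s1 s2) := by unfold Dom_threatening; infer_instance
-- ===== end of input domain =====

-- B replaces A's 8-entry knight-move table and loop with a closed-form test on the absolute coordinate deltas (simpler).

-- ===== PORT A =====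
def threatening (s1 : Int × Int) (s2 : Int × Int) : Bool :=
  if s1.1 == s2.1 || s1.2 == s2.2 then true
  else
    -- list of knight moves; the for-loop with early return is List.any
    let knight_m : List (Int × Int) := [(1, 2), (2, 1), (2, -1), (1, -2), (-1, -2), (-2, -1), (-2, 1), (-1, 2)]
    knight_m.any (fun m => (s1.1 + m.1, s1.2 + m.2) == s2)

-- ===== PORT B =====
def threatening_alt (s1 : Int × Int) (s2 : Int × Int) : Bool :=
  let dx := (s1.1 - s2.1).natAbs
  let dy := (s1.2 - s2.2).natAbs
  -- {dx, dy} == {1, 2} as a set equality of two naturals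
  dx == 0 || dy == 0 || ((dx == 1 && dy == 2) || (dx == 2 && dy == 1))

-- ===== PRECONDITION & SPEC =====
def Spec_threatening (s1 : Int × Int) (s2 : Int × Int) (out : Bool) : Prop := out = threatening_alt s1 s2
instance (s1 : Int × Int) (s2 : Int × Int) (out : Bool) : Decidable (Spec_threatening s1 s2 out) := by unfold Spec_threatening; infer_instance

-- ===== CLAIM (what is proved, stated in full; the proofs are below) =====
def Claim_equal_threatening : Prop := ∀ (s1 : Int × Int) (s2 : Int × Int), Dom_threatening s1 s2 → Spec_threatening s1 s2 (threatening s1 s2)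

-- ===== LEMMAS AND PROOFS =====

-- ===== VERDICT (by name: the statement is the Claim_ definition above) =====
theorem threatening_spec : Claim_equal_threatening := by
  intro s1 s2 _
  obtain ⟨a, b⟩ := s1
  obtain ⟨c, d⟩ := s2
  unfold Spec_threatening threatening threatening_alt
  rw [Bool.eq_iff_iff]
  simp only [List.any_cons, List.any_nil, beq_iff_eq, Prod.mk.injEq, decide_eq_true_eq,
    Bool.or_eq_true, Bool.if_true_left, Bool.and_eq_true, Bool.false_eq_true, or_false]
  omega
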